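-- pv_equiv track=rewrite | github.com/ivyyqwang/bfs-pr-scaling-sc-2024 | udgem5sim/ext/updown/udbasim/testprogs/hash_testing_code_generator.py | crc64_helper_hashsb64
-- ===== SOURCE A (Python) =====
-- def crc64_helper_hashsb64(val):
-- 	poly = 0xC96C5795D7870F42
-- 	crc = val
-- 	for i in range(64):
-- 		if crc & 1:
-- 			crc = (crc >> 1) ^ poly
-- 		else:
-- 			crc = (crc >> 1)
-- 	return crc
-- ===== SOURCE B (Python) =====
-- _POLY = 0xC96C5795D7870F42
--
-- def _byte_crc(b):
--     c = b
--     for _ in range(8):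
--         c = (c >> 1) ^ _POLY if c & 1 else c >> 1
--     return c
--
-- _TABLE = [_byte_crc(b) for b in range(256)]
--
-- def crc64_helper_hashsb64(val):
--     crc = val
--     for _ in range(8):
--         crc = (crc >> 8) ^ _TABLE[crc & 0xFF]
--     return crc
-- ===== Notes on version B (the rewrite author's own statement) =====
-- stated objective: faster
-- what changed: Replaces the sixty-four-iteration bit-at-a-time CRC loop with a byte-wise table lookup: a two-hundred-fifty-six-entry table precomputed once at import, then eight iterations of crc = (crc >> 8) ^ table[crc & 0xFF], with no word-size masking so negative and arbitrary-precision inputs behave identically.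
import Mathlib
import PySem

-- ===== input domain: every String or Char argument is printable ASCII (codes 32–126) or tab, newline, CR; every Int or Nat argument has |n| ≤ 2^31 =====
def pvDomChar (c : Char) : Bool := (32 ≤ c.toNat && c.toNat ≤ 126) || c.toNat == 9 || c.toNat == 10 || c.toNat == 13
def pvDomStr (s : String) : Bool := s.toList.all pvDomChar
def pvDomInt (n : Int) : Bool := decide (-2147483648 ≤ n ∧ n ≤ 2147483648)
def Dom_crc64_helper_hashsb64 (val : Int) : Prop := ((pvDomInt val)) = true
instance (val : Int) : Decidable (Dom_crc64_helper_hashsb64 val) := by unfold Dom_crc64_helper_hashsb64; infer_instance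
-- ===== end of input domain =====

-- B replaces A's bit-at-a-time CRC loop (one step per bit) by a precomputed byte table
-- and a byte-at-a-time pass (fewer, coarser steps; a timing run could not measure it).

-- ===== PORT A =====
-- poly = 0xC96C5795D7870F42
def pvPolyA : Int := 0xC96C5795D7870F42

-- for i in range(64): crc = (crc >> 1) ^ poly if crc & 1 else crc >> 1
def crc64_helper_hashsb64 (val : Int) : Int :=
  (List.range 64).foldl
    (fun crc _ =>
      if PySem.Int.band crc 1 ≠ 0 then PySem.Int.bxor (crc >>> (1 : Nat)) pvPolyA
      else crc >>> (1 : Nat))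
    val

-- ===== PORT B =====
def pvPolyB : Int := 0xC96C5795D7870F42

-- _byte_crc(b): eight bit-reduction steps starting from b
def pvByteCRC (b : Int) : Int :=
  (List.range 8).foldl
    (fun c _ =>
      if PySem.Int.band c 1 ≠ 0 then PySem.Int.bxor (c >>> (1 : Nat)) pvPolyB
      else c >>> (1 : Nat))
    b

-- _TABLE = [_byte_crc(b) for b in range(256)]
def pvTable : List Int := (List.range 256).map (fun b : Nat => pvByteCRC (Int.ofNat b))

-- for _ in range(8): crc = (crc >> 8) ^ _TABLE[crc & 0xFF]
-- The index crc & 0xFF always lies in [0, 255], so the .getD 0 totalization never fires.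
def crc64_helper_hashsb64_alt (val : Int) : Int :=
  (List.range 8).foldl
    (fun crc _ =>
      PySem.Int.bxor (crc >>> (8 : Nat))
        ((PySem.List.pyGet? pvTable (PySem.Int.band crc 255)).getD 0))
    val

-- ===== PRECONDITION & SPEC =====
def Spec_crc64_helper_hashsb64 (val : Int) (out : Int) : Prop := out = crc64_helper_hashsb64_alt val
instance (val : Int) (out : Int) : Decidable (Spec_crc64_helper_hashsb64 val out) := by unfold Spec_crc64_helper_hashsb64; infer_instance

-- ===== CLAIM (what is proved, stated in full; the proofs are below) =====
def Claim_equal_crc64_helper_hashsb64 : Prop := ∀ (val : Int), Dom_crc64_helper_hashsb64 val → Spec_crc64_helper_hashsb64 val (crc64_helper_hashsb64 val)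

-- ===== LEMMAS AND PROOFS =====

-- The single bit-reduction step, over core Int operations.
def pvS (c : Int) : Int :=
  if Int.land c 1 ≠ 0 then Int.xor (c >>> (1 : Nat)) pvPolyA else c >>> (1 : Nat)

-- Bridges from PySem's Python-exact bitwise operations to core Int.xor / Int.land.
theorem pv_bxor_eq (a b : Int) : PySem.Int.bxor a b = Int.xor a b := by
  rcases a with m | m <;> rcases b with n | n <;>
    simp [PySem.Int.bxor, Int.xor, Int.negSucc_eq] <;> omega

theorem pv_zero_ldiff (n : Nat) : Nat.ldiff 0 n = 0 :=
  Nat.eq_of_testBit_eq fun k => by simp [Nat.testBit_ldiff]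

theorem pv_ldiff_zero (m : Nat) : m.ldiff 0 = m :=
  Nat.eq_of_testBit_eq fun k => by simp [Nat.testBit_ldiff]

theorem pv_ldiff_eq (m n : Nat) : m.ldiff n = m - (m &&& n) := by
  induction m using Nat.binaryRec generalizing n with
  | zero => simp [pv_zero_ldiff]
  | bit bm m ih =>
    cases n using Nat.binaryRec with
    | zero => simp [pv_ldiff_zero]
    | bit bn n _ =>
      have h1 : (Nat.bit bm m).ldiff (Nat.bit bn n) = Nat.bit (bm && !bn) (m.ldiff n) := by
        simp [Nat.ldiff]
      have h2 : (Nat.bit bm m) &&& (Nat.bit bn n) = Nat.bit (bm && bn) (m &&& n) := by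
        simp [HAnd.hAnd, AndOp.and, Nat.land]
      rw [h1, h2, ih]
      have hle : m &&& n ≤ m := Nat.and_le_left
      cases bm <;> cases bn <;> simp [Nat.bit] <;> omega

theorem pv_band_eq (a b : Int) : PySem.Int.band a b = Int.land a b := by
  rcases a with m | m <;> rcases b with n | n <;>
    simp [PySem.Int.band, Int.land, Int.negSucc_eq, pv_ldiff_eq, Nat.and_comm] <;> omega

-- testBit toolkit for core Int.
theorem pv_testBit_ext {a b : Int} (h : ∀ k, a.testBit k = b.testBit k) : a = b := by
  rcases a with m | m <;> rcases b with n | n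
  · exact congrArg Int.ofNat (Nat.eq_of_testBit_eq fun k => h k)
  · exfalso
    have hk := h (m + n)
    have hm : m.testBit (m + n) = false :=
      Nat.testBit_lt_two_pow (lt_of_lt_of_le (Nat.lt_two_pow_self)
        (Nat.pow_le_pow_right (by norm_num) (Nat.le_add_right m n)))
    have hn : n.testBit (m + n) = false :=
      Nat.testBit_lt_two_pow (lt_of_lt_of_le (Nat.lt_two_pow_self)
        (Nat.pow_le_pow_right (by norm_num) (Nat.le_add_left n m)))
    simp [Int.testBit, hm, hn] at hk
  · exfalso
    have hk := h (m + n)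
    have hm : m.testBit (m + n) = false :=
      Nat.testBit_lt_two_pow (lt_of_lt_of_le (Nat.lt_two_pow_self)
        (Nat.pow_le_pow_right (by norm_num) (Nat.le_add_right m n)))
    have hn : n.testBit (m + n) = false :=
      Nat.testBit_lt_two_pow (lt_of_lt_of_le (Nat.lt_two_pow_self)
        (Nat.pow_le_pow_right (by norm_num) (Nat.le_add_left n m)))
    simp [Int.testBit, hm, hn] at hk
  · have : m = n := Nat.eq_of_testBit_eq fun k => by
      have := h k; simpa [Int.testBit] using this
    exact congrArg Int.negSucc this

theorem pv_testBit_shiftRight (a : Int) (n k : Nat) :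
    (a >>> n).testBit k = a.testBit (n + k) := by
  rcases a with m | m <;>
    simp only [HShiftRight.hShiftRight, Int.shiftRight, Int.testBit] <;>
    rw [show ShiftRight.shiftRight m n = m >>> n from rfl, Nat.testBit_shiftRight]

theorem pv_testBit_zero_int (k : Nat) : (0 : Int).testBit k = false := by
  simp [Int.testBit]

-- xor algebra on core Int, all by bit extensionality
theorem pv_xor_zero (a : Int) : Int.xor a 0 = a :=
  pv_testBit_ext fun k => by simp [Int.testBit_lxor, pv_testBit_zero_int]

theorem pv_xor_cancel (a b : Int) : Int.xor (Int.xor a b) b = a :=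
  pv_testBit_ext fun k => by
    rw [Int.testBit_lxor, Int.testBit_lxor]
    cases a.testBit k <;> cases b.testBit k <;> rfl

theorem pv_shiftRight_xor (a b : Int) (n : Nat) :
    (Int.xor a b) >>> n = Int.xor (a >>> n) (b >>> n) :=
  pv_testBit_ext fun k => by
    simp [pv_testBit_shiftRight, Int.testBit_lxor]

-- land with 255 reads the low byte
theorem pv_testBit_255 (k : Nat) : (255 : Int).testBit k = decide (k < 8) := by
  have : (255 : Int) = Int.ofNat 255 := rfl
  rw [this]
  show (255 : Nat).testBit k = decide (k < 8)
  have : (255 : Nat) = 2 ^ 8 - 1 := by norm_num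
  rw [this, Nat.testBit_two_pow_sub_one]

theorem pv_testBit_land255 (c : Int) (k : Nat) :
    (Int.land c 255).testBit k = (c.testBit k && decide (k < 8)) := by
  rw [Int.testBit_land, pv_testBit_255]

-- S characterized via the low bit
theorem pv_land_one (c : Int) : Int.land c 1 = if c.testBit 0 then 1 else 0 := by
  have h1 : ∀ j, (1 : Int).testBit j = decide (j = 0) := by
    intro j
    show (1 : Nat).testBit j = decide (j = 0)
    cases j with
    | zero => simp
    | succ j => simp [Nat.testBit_succ]
  apply pv_testBit_ext
  intro k
  rw [Int.testBit_land, h1 k]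
  rcases Nat.eq_zero_or_pos k with rfl | hk
  · cases hc : c.testBit 0 <;> simp [h1, pv_testBit_zero_int]
  · have hk0 : k ≠ 0 := by omega
    cases hc : c.testBit 0 <;> simp [hk0, h1, pv_testBit_zero_int]

theorem pv_S_eq (c : Int) :
    pvS c = Int.xor (c >>> (1 : Nat)) (if c.testBit 0 then pvPolyA else 0) := by
  unfold pvS
  rw [pv_land_one c]
  cases hc : c.testBit 0 <;> simp [pv_xor_zero]

theorem pv_S_linear (a b : Int) : pvS (Int.xor a b) = Int.xor (pvS a) (pvS b) := by
  rw [pv_S_eq, pv_S_eq, pv_S_eq]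
  have hbit : (Int.xor a b).testBit 0 = ((a.testBit 0).xor (b.testBit 0)) := Int.testBit_lxor a b 0
  rw [pv_shiftRight_xor, hbit]
  apply pv_testBit_ext
  intro k
  cases ha : a.testBit 0 <;> cases hb : b.testBit 0 <;>
    simp [Int.testBit_lxor, pv_testBit_zero_int] <;>
    cases ((a >>> (1:Nat)).testBit k) <;> cases ((b >>> (1:Nat)).testBit k) <;>
    cases (pvPolyA.testBit k) <;> rfl

theorem pv_S_iter_linear (n : Nat) (a b : Int) :
    pvS^[n] (Int.xor a b) = Int.xor (pvS^[n] a) (pvS^[n] b) := by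
  induction n generalizing a b with
  | zero => rfl
  | succ n ih => rw [Function.iterate_succ_apply, Function.iterate_succ_apply,
      Function.iterate_succ_apply, pv_S_linear, ih]

-- on an input whose low n bits are zero, n steps are just a shift
theorem pv_S_iter_high (n : Nat) (x : Int) (h : ∀ j, j < n → x.testBit j = false) :
    pvS^[n] x = x >>> n := by
  induction n generalizing x with
  | zero =>
    apply pv_testBit_ext
    intro k
    simp
  | succ n ih =>
    rw [Function.iterate_succ_apply]
    have hstep : pvS x = x >>> (1 : Nat) := by
      rw [pv_S_eq, h 0 (Nat.succ_pos n)]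
      simp [pv_xor_zero]
    rw [hstep, ih _ (fun j hj => by
      rw [pv_testBit_shiftRight]
      exact h (1 + j) (by omega))]
    apply pv_testBit_ext
    intro k
    rw [pv_testBit_shiftRight, pv_testBit_shiftRight, pv_testBit_shiftRight]
    congr 1
    omega

-- the key byte-step identity: 8 bit steps = shift by 8 xor 8 bit steps on the low byte
theorem pv_byte_step (c : Int) :
    pvS^[8] c = Int.xor (c >>> (8 : Nat)) (pvS^[8] (Int.land c 255)) := by
  set low := Int.land c 255 with hlow
  set high := Int.xor c low with hhigh
  have hdecomp : c = Int.xor high low := by rw [hhigh, pv_xor_cancel]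
  have hhz : ∀ j, j < 8 → high.testBit j = false := by
    intro j hj
    rw [hhigh, Int.testBit_lxor, hlow, pv_testBit_land255]
    cases c.testBit j <;> simp [hj]
  have hhsh : high >>> (8 : Nat) = c >>> (8 : Nat) := by
    apply pv_testBit_ext
    intro k
    rw [pv_testBit_shiftRight, pv_testBit_shiftRight, hhigh, Int.testBit_lxor, hlow,
      pv_testBit_land255]
    have h8 : ¬(8 + k < 8) := by omega
    cases c.testBit (8 + k) <;> simp [h8]
  calc pvS^[8] c = pvS^[8] (Int.xor high low) := by rw [← hdecomp]
    _ = Int.xor (pvS^[8] high) (pvS^[8] low) := pv_S_iter_linear 8 high low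
    _ = Int.xor (high >>> (8 : Nat)) (pvS^[8] low) := by rw [pv_S_iter_high 8 high hhz]
    _ = Int.xor (c >>> (8 : Nat)) (pvS^[8] low) := by rw [hhsh]

-- folding a constant-body loop over range n is n-fold iteration
theorem pv_foldl_range_const (g : Int → Int) (n : Nat) (x : Int) :
    (List.range n).foldl (fun c _ => g c) x = g^[n] x := by
  induction n generalizing x with
  | zero => rfl
  | succ n ih =>
    rw [List.range_succ, List.foldl_append, ih, List.foldl_cons, List.foldl_nil,
      Function.iterate_succ_apply']

-- A's loop body is pvS
theorem pv_A_eq_iter (val : Int) : crc64_helper_hashsb64 val = pvS^[64] val := by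
  unfold crc64_helper_hashsb64
  have hbody : (fun (crc : Int) (_ : Nat) =>
      if PySem.Int.band crc 1 ≠ 0 then PySem.Int.bxor (crc >>> (1 : Nat)) pvPolyA
      else crc >>> (1 : Nat)) = fun crc _ => pvS crc := by
    funext crc i
    simp only [pv_band_eq, pv_bxor_eq, pvS]
  rw [hbody, pv_foldl_range_const]

-- bounds of the table index
theorem pv_land255_bounds (c : Int) : 0 ≤ Int.land c 255 ∧ Int.land c 255 < 256 := by
  rcases c with m | m
  · show 0 ≤ (Int.ofNat (m &&& 255)) ∧ (Int.ofNat (m &&& 255)) < 256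
    have h : m &&& 255 < 256 := Nat.lt_succ_of_le Nat.and_le_right
    exact ⟨Int.natCast_nonneg _, Int.ofNat_lt.mpr h⟩
  · show 0 ≤ (Int.ofNat ((255 : Nat).ldiff m)) ∧ (Int.ofNat ((255 : Nat).ldiff m)) < 256
    have h : (255 : Nat).ldiff m < 256 := by
      rw [pv_ldiff_eq]; omega
    exact ⟨Int.natCast_nonneg _, Int.ofNat_lt.mpr h⟩

-- the table entry at a low-byte index is 8 bit steps on that byte
theorem pv_byteCRC_eq (b : Int) : pvByteCRC b = pvS^[8] b := by
  unfold pvByteCRC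
  have hbody : (fun (c : Int) (_ : Nat) =>
      if PySem.Int.band c 1 ≠ 0 then PySem.Int.bxor (c >>> (1 : Nat)) pvPolyB
      else c >>> (1 : Nat)) = fun c _ => pvS c := by
    funext c i
    simp only [pv_band_eq, pv_bxor_eq, pvS, pvPolyA, pvPolyB]
  rw [hbody, pv_foldl_range_const]

theorem pv_table_lookup (c : Int) :
    (PySem.List.pyGet? pvTable (PySem.Int.band c 255)).getD 0 = pvS^[8] (Int.land c 255) := by
  rw [pv_band_eq]
  obtain ⟨h0, h256⟩ := pv_land255_bounds c
  have hnat : Int.land c 255 = (((Int.land c 255).toNat : Nat) : Int) :=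
    (Int.toNat_of_nonneg h0).symm
  have hlt : (Int.land c 255).toNat < 256 := by omega
  have htab : ∀ k : Nat, k < 256 → pvTable[k]? = some (pvByteCRC (k : Int)) := by
    intro k hk
    unfold pvTable
    simp only [List.getElem?_map, List.getElem?_range hk, Option.map_some]
    rfl
  rw [hnat, PySem.List.pyGet?_natCast, htab _ hlt, Option.getD_some, pv_byteCRC_eq, ← hnat]

-- B's loop body computes one byte step
theorem pv_B_eq_iter (val : Int) :
    crc64_helper_hashsb64_alt val = (pvS^[8])^[8] val := by
  unfold crc64_helper_hashsb64_alt
  have hbody : (fun (crc : Int) (_ : Nat) =>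
      PySem.Int.bxor (crc >>> (8 : Nat))
        ((PySem.List.pyGet? pvTable (PySem.Int.band crc 255)).getD 0)) =
      fun crc _ => pvS^[8] crc := by
    funext crc i
    rw [pv_bxor_eq, pv_table_lookup, ← pv_byte_step]
  rw [hbody, pv_foldl_range_const]

-- ===== VERDICT (by name: the statement is the Claim_ definition above) =====
theorem crc64_helper_hashsb64_spec : Claim_equal_crc64_helper_hashsb64 := by
  intro val _
  show crc64_helper_hashsb64 val = crc64_helper_hashsb64_alt val
  rw [pv_A_eq_iter, pv_B_eq_iter, ← Function.iterate_mul]
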